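-- pv_equiv track=rewrite | github.com/valarao/advent-of-code-2025 | src/solutions/day_06.py | find_breakpoints
-- ===== SOURCE A (Python) =====
-- def find_breakpoints(matrix):
--     breakpoints = []
--     for c in range(len(matrix[0])):
--         is_breakpoint = True
--         for r in range(len(matrix) - 1):
--             if matrix[r][c] != " ":
--                 is_breakpoint = False
--         if is_breakpoint:
--             breakpoints.append(c)
--
--     return breakpoints
-- ===== SOURCE B (Python) =====
-- def find_breakpoints(matrix):
--     n_cols = len(matrix[0])
--     disqualified = set()
--     for r in range(len(matrix) - 1):
--         for c in range(n_cols):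
--             if matrix[r][c] != " ":
--                 disqualified.add(c)
--     return [c for c in range(n_cols) if c not in disqualified]
-- ===== Notes on version B (the rewrite author's own statement) =====
-- stated objective: alternative
-- what changed: B reverses the traversal (rows outer, columns inner) and maintains a set of disqualified columns instead of a per-column boolean flag, then emits the complement with a list comprehension.
import Mathlib
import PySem

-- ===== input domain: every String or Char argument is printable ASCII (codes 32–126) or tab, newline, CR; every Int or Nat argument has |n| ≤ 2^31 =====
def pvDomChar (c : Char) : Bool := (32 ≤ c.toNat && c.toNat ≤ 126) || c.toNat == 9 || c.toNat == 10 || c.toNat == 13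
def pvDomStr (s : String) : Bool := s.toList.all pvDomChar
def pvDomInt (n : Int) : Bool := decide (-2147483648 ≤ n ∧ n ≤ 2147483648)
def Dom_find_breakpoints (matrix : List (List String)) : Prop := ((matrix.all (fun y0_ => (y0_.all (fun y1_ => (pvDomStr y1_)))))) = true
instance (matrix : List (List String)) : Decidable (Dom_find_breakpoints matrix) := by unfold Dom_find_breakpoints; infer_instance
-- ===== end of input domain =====

-- B scans rows outer / columns inner, collecting a set of disqualified columns, then emits the
-- complement; same asymptotic cost as A's column-outer flag scan (objective: alternative).


-- ===== PORT A =====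
def find_breakpoints (matrix : List (List String)) : List Int :=
  (PySem.List.pyRange 0 ((matrix.headD []).length : Int) 1).foldl
    (fun bps c =>
      let is_breakpoint :=
        (PySem.List.pyRange 0 ((matrix.length : Int) - 1) 1).foldl
          (fun b r =>
            if PySem.List.pyGetD (PySem.List.pyGetD matrix r []) c "" ≠ " " then false else b)
          true
      if is_breakpoint then bps ++ [c] else bps)
    []

-- ===== PORT B =====
def find_breakpoints_alt (matrix : List (List String)) : List Int :=
  let nCols : Int := ((matrix.headD []).length : Int)
  let disqualified : PySem.Set Int :=
    (PySem.List.pyRange 0 ((matrix.length : Int) - 1) 1).foldl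
      (fun s r =>
        (PySem.List.pyRange 0 nCols 1).foldl
          (fun s c =>
            if PySem.List.pyGetD (PySem.List.pyGetD matrix r []) c "" ≠ " "
            then PySem.Set.add s c else s)
          s)
      PySem.Set.empty
  (PySem.List.pyRange 0 nCols 1).filter (fun c => !(PySem.Set.contains disqualified c))

-- ===== PRECONDITION & SPEC =====
-- Pre_ excludes exactly the inputs where Python A raises IndexError: the empty matrix
-- (matrix[0]) and ragged input where some row before the last is shorter than row 0.
def Pre_find_breakpoints (matrix : List (List String)) : Prop :=
  matrix ≠ [] ∧ ∀ row ∈ matrix.dropLast, (matrix.headD []).length ≤ row.length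
instance (matrix : List (List String)) : Decidable (Pre_find_breakpoints matrix) := by
  unfold Pre_find_breakpoints; infer_instance
def pvWitness_find_breakpoints : List (List String) := [["x", " "], [" ", " "]]

def Spec_find_breakpoints (matrix : List (List String)) (out : List Int) : Prop := out = find_breakpoints_alt matrix
instance (matrix : List (List String)) (out : List Int) : Decidable (Spec_find_breakpoints matrix out) := by unfold Spec_find_breakpoints; infer_instance

-- ===== CLAIM (what is proved, stated in full; the proofs are below) =====
def Claim_equal_find_breakpoints : Prop := ∀ (matrix : List (List String)), Dom_find_breakpoints matrix → Pre_find_breakpoints matrix → Spec_find_breakpoints matrix (find_breakpoints matrix)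

-- ===== LEMMAS AND PROOFS =====

-- A's inner flag loop is an 'all'.
theorem flag_foldl (cond : Int → Prop) [DecidablePred cond] (rs : List Int) (b : Bool) :
    rs.foldl (fun b r => if cond r then false else b) b
      = (b && rs.all (fun r => !decide (cond r))) := by
  induction rs generalizing b with
  | nil => simp
  | cons r rs ih =>
    simp only [List.foldl_cons, List.all_cons, ih]
    by_cases h : cond r <;> simp [h]

-- membership in B's inner column loop
theorem mem_inner_fold (q : Int → Prop) [DecidablePred q] (cs : List Int) (s : PySem.Set Int) (x : Int) :
    (x ∈ cs.foldl (fun s c => if q c then PySem.Set.add s c else s) s)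
      ↔ x ∈ s ∨ (x ∈ cs ∧ q x) := by
  induction cs generalizing s with
  | nil => simp
  | cons c cs ih =>
    simp only [List.foldl_cons, List.mem_cons, ih]
    by_cases h : q c
    · simp only [h, if_pos, PySem.Set.mem_add]
      constructor
      · rintro (⟨hx | rfl⟩ | ⟨hx, hq⟩)
        · exact Or.inl hx
        · exact Or.inr ⟨Or.inl rfl, h⟩
        · exact Or.inr ⟨Or.inr hx, hq⟩
      · rintro (hx | ⟨rfl | hx, hq⟩)
        · exact Or.inl (Or.inl hx)
        · exact Or.inl (Or.inr rfl)
        · exact Or.inr ⟨hx, hq⟩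
    · simp only [h, if_neg, not_false_iff]
      constructor
      · rintro (hx | ⟨hx, hq⟩)
        · exact Or.inl hx
        · exact Or.inr ⟨Or.inr hx, hq⟩
      · rintro (hx | ⟨rfl | hx, hq⟩)
        · exact Or.inl hx
        · exact absurd hq (by simp [h])
        · exact Or.inr ⟨hx, hq⟩

-- membership in B's full nested loop
theorem mem_outer_fold (cond : Int → Int → Prop) [∀ r c, Decidable (cond r c)] (cs : List Int) (rs : List Int)
    (s : PySem.Set Int) (x : Int) :
    (x ∈ rs.foldl
        (fun s r => cs.foldl (fun s c => if cond r c then PySem.Set.add s c else s) s) s)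
      ↔ x ∈ s ∨ ∃ r ∈ rs, x ∈ cs ∧ cond r x := by
  induction rs generalizing s with
  | nil => simp
  | cons r rs ih =>
    simp only [List.foldl_cons, ih, mem_inner_fold]
    constructor
    · rintro ((hx | ⟨hc, hq⟩) | ⟨r', hr', hc, hq⟩)
      · exact Or.inl hx
      · exact Or.inr ⟨r, List.mem_cons_self .., hc, hq⟩
      · exact Or.inr ⟨r', List.mem_cons_of_mem _ hr', hc, hq⟩
    · rintro (hx | ⟨r', hr', hc, hq⟩)
      · exact Or.inl (Or.inl hx)
      · rcases List.mem_cons.mp hr' with rfl | hr'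
        · exact Or.inl (Or.inr ⟨hc, hq⟩)
        · exact Or.inr ⟨r', hr', hc, hq⟩

-- ===== VERDICT (by name: the statement is the Claim_ definition above) =====
theorem find_breakpoints_spec : Claim_equal_find_breakpoints := by
  intro matrix _ _
  unfold Spec_find_breakpoints find_breakpoints find_breakpoints_alt
  rw [PySem.List.foldl_append_if_eq_filter]
  simp only [List.nil_append]
  apply List.filter_congr
  intro c hc
  rw [flag_foldl]
  simp only [Bool.true_and]
  unfold PySem.Set.contains
  have hmem := mem_outer_fold
    (fun r c => PySem.List.pyGetD (PySem.List.pyGetD matrix r []) c "" ≠ " ")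
    (PySem.List.pyRange 0 ((matrix.headD []).length : Int) 1)
    (PySem.List.pyRange 0 ((matrix.length : Int) - 1) 1)
    PySem.Set.empty c
  by_cases hd : ∃ r ∈ PySem.List.pyRange 0 ((matrix.length : Int) - 1) 1,
      PySem.List.pyGetD (PySem.List.pyGetD matrix r []) c "" ≠ " "
  · obtain ⟨r, hr, hne⟩ := hd
    rw [List.all_eq_false.mpr ⟨r, hr, by simp [hne]⟩]
    rw [List.contains_iff_mem.mpr (hmem.mpr (Or.inr ⟨r, hr, hc, hne⟩))]
    rfl
  · push Not at hd
    rw [List.all_eq_true.mpr (fun r hr => by simp [hd r hr])]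
    have hnin : c ∉ _ := fun h => by
      rcases hmem.mp h with h0 | ⟨r, hr, _, hq⟩
      · simp [PySem.Set.empty] at h0
      · exact hq (hd r hr)
    rw [Bool.eq_false_iff.mpr (fun h => hnin (List.contains_iff_mem.mp h))]
    rfl
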